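-- pv_equiv track=rewrite | github.com/lilleswing/nyt_crosswords | merge_crosswords.py | join_results
-- ===== SOURCE A (Python) =====
-- def count_solved(l):
--     solved = [x['finished'] for x in l]
--     return sum(solved)
--
-- def join_results(results):
--     master = {}
--     for result in results:
--         my_key = list(result.keys())[0]
--         if my_key not in master:
--             master[my_key] = result[my_key]
--             continue
--         old_solved = count_solved(master[my_key])
--         new_solved = count_solved(result[my_key])
--         if new_solved > old_solved:
--             master[my_key] = result[my_key]
--     return master
-- ===== SOURCE B (Python) =====
-- def count_solved(l):
--     solved = [x['finished'] for x in l]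
--     return sum(solved)
--
--
-- def join_results(results):
--     # Pass 1: group every candidate value by its result's first key, in encounter order.
--     groups = {}
--     for result in results:
--         my_key = list(result.keys())[0]
--         groups[my_key] = groups.get(my_key, []) + [result[my_key]]
--     # Pass 2: per key, pick the candidate with the most finished puzzles
--     # (max is stable, so ties keep the first-seen candidate).
--     return {k: (cands[0] if len(cands) == 1 else max(cands, key=count_solved))
--             for k, cands in groups.items()}
-- ===== Notes on version B (the rewrite author's own statement) =====
-- stated objective: alternative
-- what changed: A keeps a running winner per key inside one loop with an explicit strict-greater comparison against the stored value; B first builds a key -> list-of-candidates grouping dict and then reduces each group with a stable max keyed by count_solved, so the winner selection is a separate per-group reduction instead of interleaved dict updates.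
import Mathlib
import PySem

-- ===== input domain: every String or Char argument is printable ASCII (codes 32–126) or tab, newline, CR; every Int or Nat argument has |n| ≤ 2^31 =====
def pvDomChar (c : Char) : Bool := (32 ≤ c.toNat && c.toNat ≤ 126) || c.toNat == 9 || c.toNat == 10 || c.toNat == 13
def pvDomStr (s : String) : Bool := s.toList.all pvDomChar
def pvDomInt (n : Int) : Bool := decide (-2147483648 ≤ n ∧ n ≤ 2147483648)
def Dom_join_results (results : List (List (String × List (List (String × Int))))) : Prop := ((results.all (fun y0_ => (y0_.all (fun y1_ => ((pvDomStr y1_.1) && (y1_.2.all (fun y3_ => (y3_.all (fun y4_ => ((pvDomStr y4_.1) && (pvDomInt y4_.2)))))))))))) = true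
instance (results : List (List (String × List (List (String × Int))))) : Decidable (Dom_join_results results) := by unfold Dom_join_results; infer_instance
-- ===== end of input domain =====

-- B restructures A's single running-winner loop into group-by-first-key then a stable max per group (objective: alternative decomposition, no speed claim).
-- Shared helpers (both Pythons use the same count_solved, first-key extraction and dict lookup):
-- count_solved(l) = sum of x['finished']; the lookup default 0 / [] is only reached outside Pre_join_results (Python raises there).
def countSolvedL (l : List (List (String × Int))) : Int :=
  (l.map (fun x => (x.lookup "finished").getD 0)).sum

-- list(result.keys())[0]  (default "" only reached outside Pre_: Python raises IndexError on an empty dict)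
def firstKey (r : List (String × List (List (String × Int)))) : String :=
  (r.map Prod.fst).headD ""

-- result[my_key]  (first-match lookup; default [] unreachable for nonempty r)
def firstVal (r : List (String × List (List (String × Int)))) : List (List (String × Int)) :=
  (r.lookup (firstKey r)).getD []

-- ===== PORT A =====
-- loop body of A: insert if new key, else replace iff strictly more finished
def stepA (master : PySem.Dict String (List (List (String × Int))))
    (result : List (String × List (List (String × Int)))) :
    PySem.Dict String (List (List (String × Int))) :=
  if master.contains (firstKey result) = false then
    master.insert (firstKey result) (firstVal result)
  else if countSolvedL (firstVal result) > countSolvedL (master.getD (firstKey result) []) then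
    master.insert (firstKey result) (firstVal result)
  else master

def join_results (results : List (List (String × List (List (String × Int))))) :
    List (String × List (List (String × Int))) :=
  (results.foldl stepA PySem.Dict.empty).items

-- ===== PORT B =====
-- max(cands, key=count_solved): stable running max, first element wins ties
def maxByCount (cands : List (List (List (String × Int)))) : List (List (String × Int)) :=
  match cands with
  | [] => []
  | c :: rest => rest.foldl (fun best x => if countSolvedL x > countSolvedL best then x else best) c

-- grouping loop body of B: groups[k] = groups.get(k, []) + [result[k]]
def stepB (g : PySem.Dict String (List (List (List (String × Int)))))
    (result : List (String × List (List (String × Int)))) :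
    PySem.Dict String (List (List (List (String × Int)))) :=
  g.modify (firstKey result) [] (· ++ [firstVal result])

def join_results_alt (results : List (List (String × List (List (String × Int))))) :
    List (String × List (List (String × Int))) :=
  (results.foldl stepB PySem.Dict.empty).items.map
    (fun p => (p.1, if p.2.length == 1 then p.2.headD [] else maxByCount p.2))

-- ===== PRECONDITION & SPEC =====
-- Pre_ excludes exactly the inputs where the Python raises: an empty result dict (IndexError on
-- list(result.keys())[0]), or a first key shared by ≥2 results while some inner dict of one of that
-- key's candidate lists lacks 'finished' (KeyError in count_solved, which both A and B reach there).
def Pre_join_results (results : List (List (String × List (List (String × Int))))) : Prop :=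
  (∀ r ∈ results, r ≠ []) ∧
  (∀ r ∈ results, 2 ≤ (results.filter (fun r' => firstKey r' == firstKey r)).length →
    ∀ x ∈ firstVal r, (x.lookup "finished").isSome)
instance (results : List (List (String × List (List (String × Int))))) : Decidable (Pre_join_results results) := by unfold Pre_join_results; infer_instance

def pvWitness_join_results : (List (List (String × List (List (String × Int))))) :=
  [[("a", [[("finished", 1)]])],
   [("a", [[("finished", 2)], [("finished", 0)]])],
   [("b", [])]]

def Spec_join_results (results : List (List (String × List (List (String × Int))))) (out : List (String × List (List (String × Int)))) : Prop := out = join_results_alt results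
instance (results : List (List (String × List (List (String × Int))))) (out : List (String × List (List (String × Int)))) : Decidable (Spec_join_results results out) := by unfold Spec_join_results; infer_instance

-- ===== CLAIM (what is proved, stated in full; the proofs are below) =====
def Claim_equal_join_results : Prop := ∀ (results : List (List (String × List (List (String × Int))))), Dom_join_results results → Pre_join_results results → Spec_join_results results (join_results results)

-- ===== LEMMAS AND PROOFS =====

-- the running-winner step and the candidate list of a key
def wstep (b c : List (List (String × Int))) : List (List (String × Int)) :=
  if countSolvedL c > countSolvedL b then c else b

def cands (k : String) (results : List (List (String × List (List (String × Int))))) :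
    List (List (List (String × Int))) :=
  (results.filter (fun r => firstKey r == k)).map firstVal

def comb (o : Option (List (List (String × Int)))) (cs : List (List (List (String × Int)))) :
    Option (List (List (String × Int))) :=
  match o with
  | some b => some (cs.foldl wstep b)
  | none => match cs with
    | [] => none
    | c :: rest => some (rest.foldl wstep c)

lemma foldA_get? (rs : List (List (String × List (List (String × Int)))))
    (master : PySem.Dict String (List (List (String × Int)))) (k : String) :
    (rs.foldl stepA master).get? k = comb (master.get? k) (cands k rs) := by
  induction rs generalizing master with
  | nil =>
    simp [cands]
    cases master.get? k <;> simp [comb]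
  | cons r rest ih =>
    simp only [List.foldl_cons, ih]
    by_cases hk : firstKey r = k
    · subst hk
      have h2 : cands (firstKey r) (r :: rest) = firstVal r :: cands (firstKey r) rest := by
        simp [cands]
      rw [h2]
      by_cases hc : master.contains (firstKey r) = false
      · have hnone : master.get? (firstKey r) = none := by
          rw [← PySem.Dict.get?_eq_none_iff_contains] at hc
          exact hc
        simp [stepA, hc, PySem.Dict.get?_insert_self, hnone, comb]
      · have hc' : master.contains (firstKey r) = true := by
          cases h : master.contains (firstKey r) <;> simp_all
        obtain ⟨old, hold⟩ : ∃ old, master.get? (firstKey r) = some old := by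
          have := PySem.Dict.contains_eq_isSome_get? master (firstKey r)
          rw [hc'] at this
          exact Option.isSome_iff_exists.mp this.symm
        have hgetD : master.getD (firstKey r) [] = old := by
          rw [PySem.Dict.getD_eq_get?_getD, hold]; rfl
        have h1 : (stepA master r).get? (firstKey r) = some (wstep old (firstVal r)) := by
          unfold stepA wstep
          rw [if_neg (by simp [hc']), hgetD]
          split
          · rw [PySem.Dict.get?_insert_self]
          · rw [hold]
        rw [h1, hold]
        simp only [comb, List.foldl_cons]
    · have hcf : (firstKey r == k) = false := beq_false_of_ne hk
      have hget : (stepA master r).get? k = master.get? k := by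
        unfold stepA
        split
        · exact PySem.Dict.get?_insert_of_ne master _ (Ne.symm hk)
        · split
          · exact PySem.Dict.get?_insert_of_ne master _ (Ne.symm hk)
          · rfl
      simp [cands, hcf, hget]

lemma foldA_keys (rs : List (List (String × List (List (String × Int)))))
    (master : PySem.Dict String (List (List (String × Int)))) :
    (rs.foldl stepA master).keys = PySem.Set.update master.keys (rs.map firstKey) := by
  induction rs generalizing master with
  | nil => simp [PySem.Set.update]
  | cons r rest ih =>
    simp only [List.foldl_cons, List.map_cons, PySem.Set.update_cons, ih]
    congr 1
    by_cases hc : master.contains (firstKey r) = false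
    · have hmem : firstKey r ∉ master.keys := by
        intro hmem
        rw [← PySem.Dict.contains_iff_mem_keys] at hmem
        simp [hmem] at hc
      rw [PySem.Set.add_of_not_mem hmem]
      simp [stepA, hc, PySem.Dict.keys_insert_of_not_contains master _ hc]
    · have hc' : master.contains (firstKey r) = true := by
        cases h : master.contains (firstKey r) <;> simp_all
      have hmem : firstKey r ∈ master.keys :=
        (PySem.Dict.contains_iff_mem_keys master (firstKey r)).mp hc'
      rw [PySem.Set.add_of_mem hmem]
      unfold stepA
      simp only [hc']
      split
      · exact PySem.Dict.keys_insert_of_contains master _ hc'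
      · split
        · exact PySem.Dict.keys_insert_of_contains master _ hc'
        · rfl

lemma foldB_eq (results : List (List (String × List (List (String × Int))))) :
    results.foldl stepB PySem.Dict.empty =
    (results.map (fun r => (firstKey r, firstVal r))).foldl
      (fun d p => d.modify p.1 [] (· ++ [p.2])) PySem.Dict.empty := by
  rw [List.foldl_map]
  rfl

lemma foldB_getD (results : List (List (String × List (List (String × Int))))) (k : String) :
    (results.foldl stepB PySem.Dict.empty).getD k [] = cands k results := by
  rw [foldB_eq, PySem.Dict.getD_foldl_modify_append]
  simp [cands, List.filter_map, Function.comp_def]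

lemma foldB_keys (results : List (List (String × List (List (String × Int))))) :
    (results.foldl stepB PySem.Dict.empty).keys = PySem.Set.ofList (results.map firstKey) := by
  rw [foldB_eq]
  rw [PySem.Dict.keys_foldl_modify_key
    (results.map (fun r => (firstKey r, firstVal r))) (fun p => p.1) []
    (fun _ p x => x ++ [p.2]) PySem.Dict.empty]
  simp [PySem.Dict.keys_empty, PySem.Set.update_nil_left, List.map_map, Function.comp_def]

-- the per-group pick of B equals the running-winner fold on a nonempty group
lemma pick_eq_winner (cs : List (List (List (String × Int)))) (c : List (List (String × Int)))
    (rest : List (List (List (String × Int)))) (h : cs = c :: rest) :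
    (if cs.length == 1 then cs.headD [] else maxByCount cs) = rest.foldl wstep c := by
  subst h
  cases rest with
  | nil => simp
  | cons d ds =>
    rw [if_neg (by simp)]
    rfl

-- ===== VERDICT (by name: the statement is the Claim_ definition above) =====
theorem join_results_spec : Claim_equal_join_results := by
  intro results _hdom _hpre
  unfold Spec_join_results join_results join_results_alt
  have hAkeys : (results.foldl stepA PySem.Dict.empty).keys
      = PySem.Set.ofList (results.map firstKey) := by
    rw [foldA_keys]
    simp [PySem.Dict.keys_empty, PySem.Set.update_nil_left]
  have hAnodup : (results.foldl stepA PySem.Dict.empty).keys.Nodup := by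
    rw [hAkeys]; exact PySem.Set.nodup_ofList _
  have hBnodup : (results.foldl stepB PySem.Dict.empty).keys.Nodup := by
    rw [foldB_keys]; exact PySem.Set.nodup_ofList _
  rw [PySem.Dict.items_eq_map_keys _ hAnodup [],
      PySem.Dict.items_eq_map_keys _ hBnodup []]
  rw [List.map_map, hAkeys, foldB_keys]
  apply List.map_congr_left
  intro k hk
  have hkmem : k ∈ results.map firstKey := (PySem.Set.mem_ofList _ _).mp hk
  obtain ⟨r, hr, hkr⟩ := List.mem_map.mp hkmem
  have hcne : cands k results ≠ [] := by
    unfold cands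
    simp only [ne_eq, List.map_eq_nil_iff, List.filter_eq_nil_iff, not_forall]
    exact ⟨r, hr, by simp [hkr]⟩
  obtain ⟨c, rest, hcs⟩ := List.exists_cons_of_ne_nil hcne
  have hA : (results.foldl stepA PySem.Dict.empty).getD k [] = rest.foldl wstep c := by
    rw [PySem.Dict.getD_eq_get?_getD, foldA_get?]
    simp [PySem.Dict.get?_empty, comb, hcs]
  simp only [Function.comp_def, hA, foldB_getD, hcs]
  rw [pick_eq_winner (c :: rest) c rest rfl]
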